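-- pv_equiv track=rewrite | github.com/IMakeBotsForYou/anki-monolingual-conversion-jp | convert_to_big_data.py | convert_to_path
-- ===== SOURCE A (Python) =====
-- def convert_to_path(reference_numbers):
--     path = []
--     counter = 0
--     for i, x in enumerate(reference_numbers):
--         if counter > 0:
--             counter -= 1
--             continue
--
--         if x <= "9" and counter == 0:
--             path.append(f"{x}{reference_numbers[i + 1]}{reference_numbers[i + 2]}")
--             counter = 2
--         else:
--             path.append(x)
--
--     return path
-- ===== SOURCE B (Python) =====
-- def convert_to_path(reference_numbers):
--     # Stage 1: compute the start index of every output segment.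
--     starts = []
--     i = 0
--     n = len(reference_numbers)
--     while i < n:
--         starts.append(i)
--         i += 3 if reference_numbers[i] <= "9" else 1
--     # Stage 2: materialise each segment from its start index.
--     return ["".join(reference_numbers[s:s + 3]) if reference_numbers[s] <= "9"
--             else reference_numbers[s]
--             for s in starts]
-- ===== Notes on version B (the rewrite author's own statement) =====
-- stated objective: alternative
-- what changed: Replaced A's single accumulator pass with a skip counter by a two-stage algorithm: a first scan computes only the start index of every segment, and a second pass builds each output element from its start index by slicing and joining; no output string is touched during the scan and no skip state exists.
import Mathlib
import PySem

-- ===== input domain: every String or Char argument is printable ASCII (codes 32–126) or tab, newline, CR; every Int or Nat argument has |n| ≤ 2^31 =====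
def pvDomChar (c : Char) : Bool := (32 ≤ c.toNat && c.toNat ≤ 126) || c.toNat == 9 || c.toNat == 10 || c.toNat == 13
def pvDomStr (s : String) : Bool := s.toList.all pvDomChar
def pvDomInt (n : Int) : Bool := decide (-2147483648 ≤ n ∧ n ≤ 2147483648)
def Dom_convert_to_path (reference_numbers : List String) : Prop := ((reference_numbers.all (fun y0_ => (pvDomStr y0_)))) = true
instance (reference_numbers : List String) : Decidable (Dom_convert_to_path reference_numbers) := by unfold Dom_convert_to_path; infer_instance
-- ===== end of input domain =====

-- B replaces A's single accumulator pass with a skip counter by a two-stage algorithm: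
-- a first scan collects only segment start indices, a second pass slices each segment out.

-- Python's 'x <= "9"' on strings: code-point lexicographic ≤, i.e. ¬ (t < s) (kernel-reducible form)
def strLe (s t : String) : Bool := ! PySem.Chars.strLt t.toList s.toList

-- ===== PORT A =====
-- the body of A's for-loop, over state (path, counter)
def stepA (reference_numbers : List String) (st : List String × Int) (p : Int × String) : List String × Int :=
  if st.2 > 0 then (st.1, st.2 - 1)
  else if strLe p.2 "9" && (st.2 == 0) then
    (st.1 ++ [p.2 ++ PySem.List.pyGetD reference_numbers (p.1 + 1) "" ++ PySem.List.pyGetD reference_numbers (p.1 + 2) ""], 2)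
  else (st.1 ++ [p.2], st.2)

def convert_to_path (reference_numbers : List String) : List String :=
  ((PySem.List.enumerate reference_numbers 0).foldl (stepA reference_numbers) ([], 0)).1

-- ===== PORT B =====
-- stage 1: the start index of every segment
def startsGo (rn : List String) (i : Nat) : List Nat :=
  if h : i < rn.length then
    i :: startsGo rn (i + (if strLe rn[i] "9" then 3 else 1))
  else []
termination_by rn.length - i
decreasing_by split <;> omega

-- stage 2: materialise the segment starting at s
def segOf (rn : List String) (s : Nat) : String :=
  if strLe (PySem.List.pyGetD rn (s : Int) "") "9" then
    PySem.Str.join "" (PySem.List.slice rn (some (s : Int)) (some ((s : Int) + 3)))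
  else PySem.List.pyGetD rn (s : Int) ""

def convert_to_path_alt (reference_numbers : List String) : List String :=
  (startsGo reference_numbers 0).map (segOf reference_numbers)

-- ===== PRECONDITION & SPEC =====
-- Pre_ excludes exactly the inputs on which A raises IndexError: a grouping element
-- (one that is ≤ "9") starting with fewer than two elements after it.
def segOk : List String → Bool
  | [] => true
  | x :: rest =>
    if strLe x "9" then
      match rest with
      | _ :: _ :: t => segOk t
      | _ => false
    else segOk rest

def Pre_convert_to_path (reference_numbers : List String) : Prop := segOk reference_numbers = true
instance (reference_numbers : List String) : Decidable (Pre_convert_to_path reference_numbers) := by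
  unfold Pre_convert_to_path; infer_instance

def pvWitness_convert_to_path : List String := ["a", "1", "b", "c", "zz"]

def Spec_convert_to_path (reference_numbers : List String) (out : List String) : Prop := out = convert_to_path_alt reference_numbers
instance (reference_numbers : List String) (out : List String) : Decidable (Spec_convert_to_path reference_numbers out) := by unfold Spec_convert_to_path; infer_instance

-- ===== CLAIM (what is proved, stated in full; the proofs are below) =====
def Claim_equal_convert_to_path : Prop := ∀ (reference_numbers : List String), Dom_convert_to_path reference_numbers → Pre_convert_to_path reference_numbers → Spec_convert_to_path reference_numbers (convert_to_path reference_numbers)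

-- ===== LEMMAS AND PROOFS =====
lemma startsGo_stop (rn : List String) (i : Nat) (h : rn.length ≤ i) :
    startsGo rn i = [] := by
  unfold startsGo; rw [dif_neg]; omega

lemma startsGo_step (rn : List String) (i : Nat) (h : i < rn.length) :
    startsGo rn i = i :: startsGo rn (i + (if strLe rn[i] "9" then 3 else 1)) := by
  conv_lhs => rw [startsGo]
  rw [dif_pos h]

lemma pyGetD_in_range (rn : List String) (i : Nat) (h : i < rn.length) :
    PySem.List.pyGetD rn (i : Int) "" = rn[i] := by
  simp [PySem.List.pyGetD, PySem.List.pyGet?, PySem.List.pyIdx?, h]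

lemma main_loop (fuel : Nat) : ∀ (rn : List String) (i : Nat) (path : List String),
    rn.length - i ≤ fuel → segOk (rn.drop i) = true →
    (PySem.List.enumerate (rn.drop i) (i : Int)).foldl (stepA rn) (path, 0) =
      (path ++ (startsGo rn i).map (segOf rn), 0) := by
  induction fuel with
  | zero =>
    intro rn i path hf _
    have hlen : rn.length ≤ i := by omega
    rw [List.drop_eq_nil_of_le hlen, startsGo_stop rn i hlen]
    simp [PySem.List.enumerate]
  | succ fuel ih =>
    intro rn i path hf hok
    cases hd : rn.drop i with
    | nil =>
      have hlen : rn.length ≤ i := by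
        have := congrArg List.length hd
        simp [List.length_drop] at this
        omega
      rw [startsGo_stop rn i hlen]
      simp [PySem.List.enumerate]
    | cons x rest =>
      have hlend := congrArg List.length hd
      simp [List.length_drop] at hlend
      have hi : i < rn.length := by omega
      have hx : rn[i] = x := by
        have h0 := congrArg (fun l => l[0]?) hd
        simp only [List.getElem?_drop, Nat.add_zero, List.getElem?_cons_zero] at h0
        have := List.getElem?_eq_getElem (l := rn) (i := i) hi
        rw [this] at h0
        exact Option.some.inj h0
      rw [hd] at hok
      rw [PySem.List.enumerate_cons, List.foldl_cons]
      by_cases hle : strLe x "9" = true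
      · -- grouping step: consumes x and the next two elements
        rcases rest with _ | ⟨a, _ | ⟨b, t⟩⟩ <;> simp [segOk, hle] at hok
        have hok' : segOk t = true := hok
        simp only [List.length_cons] at hlend
        have ha : PySem.List.pyGetD rn ((i : Int) + 1) "" = a := by
          have h1 := congrArg (fun l => l[1]?) hd
          simp only [List.getElem?_drop, List.getElem?_cons_succ, List.getElem?_cons_zero] at h1
          have hi1 : i + 1 < rn.length := by omega
          have hcast : ((i : Int) + 1) = ((i + 1 : Nat) : Int) := by push_cast; ring
          rw [hcast, pyGetD_in_range rn (i + 1) hi1]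
          have := List.getElem?_eq_getElem (l := rn) (i := i + 1) hi1
          rw [this] at h1
          exact Option.some.inj h1
        have hb : PySem.List.pyGetD rn ((i : Int) + 2) "" = b := by
          have h2 := congrArg (fun l => l[2]?) hd
          simp only [List.getElem?_drop, List.getElem?_cons_succ, List.getElem?_cons_zero] at h2
          have hi2 : i + 2 < rn.length := by omega
          have hcast : ((i : Int) + 2) = ((i + 2 : Nat) : Int) := by push_cast; ring
          rw [hcast, pyGetD_in_range rn (i + 2) hi2]
          have := List.getElem?_eq_getElem (l := rn) (i := i + 2) hi2
          rw [this] at h2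
          exact Option.some.inj h2
        have hstep : stepA rn (path, 0) ((i : Int), x) =
            (path ++ [x ++ a ++ b], 2) := by
          simp [stepA, hle, ha, hb]
        rw [hstep, PySem.List.enumerate_cons, List.foldl_cons]
        have h2 : stepA rn (path ++ [x ++ a ++ b], 2) ((i : Int) + 1, a) = (path ++ [x ++ a ++ b], 1) := by
          simp [stepA]
        rw [h2, PySem.List.enumerate_cons, List.foldl_cons]
        have h3 : stepA rn (path ++ [x ++ a ++ b], 1) ((i : Int) + 1 + 1, b) = (path ++ [x ++ a ++ b], 0) := by
          simp [stepA]
        rw [h3]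
        have ht : rn.drop (i + 3) = t := by
          have h' : rn.drop (i + 3) = (rn.drop i).drop 3 := by
            rw [List.drop_drop]
          rw [h', hd]; rfl
        have hlen3 : rn.length = i + 3 + t.length := by omega
        have hrec := ih rn (i + 3) (path ++ [x ++ a ++ b]) (by omega) (by rw [ht]; exact hok')
        rw [ht] at hrec
        have hcast : ((i : Int) + 1 + 1 + 1) = ((i + 3 : Nat) : Int) := by push_cast; ring
        rw [hcast, hrec]
        -- relate the appended element to segOf rn i
        have hseg : segOf rn i = x ++ a ++ b := by
          have hslice : PySem.List.slice rn (some (i : Int)) (some ((i : Int) + 3)) = [x, a, b] := by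
            have h3' : ((i : Int) + 3) = ((i : Int) + ((3 : Nat) : Int)) := by push_cast; ring
            rw [h3', PySem.List.slice_natCast_add, hd]
            rfl
          unfold segOf
          rw [pyGetD_in_range rn i hi, hx, if_pos hle, hslice]
          -- join "" [x, a, b] = x ++ a ++ b
          apply String.toList_injective
          simp [PySem.Str.toList_join, PySem.Chars.join, List.intercalate, List.intersperse]
        rw [startsGo_step rn i hi, hx, if_pos hle, List.map_cons, hseg]
        simp
      · -- non-grouping step
        have hle' : strLe x "9" = false := by simpa using hle
        rw [segOk.eq_def] at hok
        simp only [hle', Bool.false_eq_true, if_false] at hok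
        have hstep : stepA rn (path, 0) ((i : Int), x) = (path ++ [x], 0) := by
          simp [stepA, hle']
        rw [hstep]
        have ht : rn.drop (i + 1) = rest := by
          have h' : rn.drop (i + 1) = (rn.drop i).drop 1 := by
            rw [List.drop_drop]
          rw [h', hd]; rfl
        have hlen1 : rn.length = i + 1 + rest.length := by
          have : (x :: rest).length = rest.length + 1 := List.length_cons ..
          omega
        have hrec := ih rn (i + 1) (path ++ [x]) (by omega) (by rw [ht]; exact hok)
        rw [ht] at hrec
        have hcast : ((i : Int) + 1) = ((i + 1 : Nat) : Int) := by push_cast; ring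
        rw [hcast, hrec]
        have hseg : segOf rn i = x := by
          unfold segOf
          rw [pyGetD_in_range rn i hi, hx, if_neg (by simp [hle'])]
        rw [startsGo_step rn i hi, hx, if_neg (by simp [hle']), List.map_cons, hseg]
        simp

-- ===== VERDICT (by name: the statement is the Claim_ definition above) =====
theorem convert_to_path_spec : Claim_equal_convert_to_path := by
  intro rn _ hpre
  unfold Spec_convert_to_path convert_to_path convert_to_path_alt
  have h := main_loop rn.length rn 0 [] (by omega) (by simpa using hpre)
  simp only [List.drop_zero, Nat.cast_zero] at h
  rw [h]
  rfl
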